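-- pv_equiv track=rewrite | github.com/challenger1024/algorithm_notes | LeetCode/ProblemList/BinarySearch/1898.py | calc
-- ===== SOURCE A (Python) =====
-- def calc(s,t,remove,k):
-- 	ns,nt=len(s),len(t)
-- 	revs=[True]*ns
-- 	for i in range(k):
-- 		revs[remove[i]]=False
-- 	i=0
-- 	for j ,c in enumerate(s):
-- 		if i<nt and  revs[j] and t[i]==c:
-- 			i+=1
-- 	return i==nt
-- ===== SOURCE B (Python) =====
-- def calc(s, t, remove, k):
--     banned = set(remove[:max(k, 0)])
--     # index the surviving positions by character
--     pos = {}
--     for j, c in enumerate(s):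
--         if j not in banned:
--             pos.setdefault(c, []).append(j)
--     # greedy matching of t by binary-searching each character's position list
--     prev = -1
--     for c in t:
--         lst = pos.get(c, [])
--         lo, hi = 0, len(lst)
--         while lo < hi:
--             mid = (lo + hi) // 2
--             if lst[mid] > prev:
--                 hi = mid
--             else:
--                 lo = mid + 1
--         if lo == len(lst):
--             return False
--         prev = lst[lo]
--     return True
-- ===== Notes on version B (the rewrite author's own statement) =====
-- stated objective: alternative
-- what changed: A does one fused scan of s with a boolean deletion mask and a pointer into t; B instead builds a per-character index (dict mapping each surviving character to its sorted position list) and matches t by binary-searching, for each of its characters, the first indexed position past the previous match - the LeetCode-792 subsequence-query algorithm. Pre_ additionally excludes negative removal indices in remove[:k], an unspecified corner where A's list-assignment wraps around to remove s[len(s)+idx] while B's index set simply never matches them - both readings are defensible for out-of-spec indices.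
-- outside the precondition, e.g. on calc('ab', 'b', [-1], 1): A returns False, B returns True; on calc('ab', 'b', [-2], 1): A returns True, B returns True
import Mathlib
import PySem

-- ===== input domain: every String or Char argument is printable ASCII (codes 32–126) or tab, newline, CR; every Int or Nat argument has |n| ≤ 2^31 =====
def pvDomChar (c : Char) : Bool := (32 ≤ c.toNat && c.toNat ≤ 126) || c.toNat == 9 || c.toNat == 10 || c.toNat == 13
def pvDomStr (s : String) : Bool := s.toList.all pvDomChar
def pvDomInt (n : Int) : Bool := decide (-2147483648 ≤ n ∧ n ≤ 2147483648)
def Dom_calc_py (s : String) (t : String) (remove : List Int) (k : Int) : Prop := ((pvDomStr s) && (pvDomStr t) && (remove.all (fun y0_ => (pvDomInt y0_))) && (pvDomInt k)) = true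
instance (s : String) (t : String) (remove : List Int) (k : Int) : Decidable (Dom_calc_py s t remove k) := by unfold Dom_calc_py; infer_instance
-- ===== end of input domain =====

-- B replaces A's fused mask-and-pointer scan by a per-character position index (a dict of
-- sorted surviving-index lists) queried by hand-written binary search for each character of t;
-- same answer, different algorithm (subsequence matching via indexed binary search).


-- ===== PORT A =====
def calc_py (s : String) (t : String) (remove : List Int) (k : Int) : Bool :=
  let sl := s.toList
  let tl := t.toList
  let ns := sl.length
  let nt := tl.length
  -- revs = [True]*ns; for i in range(k): revs[remove[i]] = False  (none = IndexError)
  let revs : Option (List Bool) :=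
    (PySem.List.pyRange 0 k 1).foldl
      (fun acc i => acc.bind (fun rv =>
        (PySem.List.pyGet? remove i).bind (fun idx => PySem.List.pySet? rv idx false)))
      (some (List.replicate ns true))
  match revs with
  | none => false   -- Python raises here; excluded by Pre_calc_py
  | some rv =>
    -- i = 0; for j, c in enumerate(s): if i < nt and revs[j] and t[i] == c: i += 1
    let fi := (PySem.List.enumerate sl 0).foldl
      (fun (i : Nat) jc =>
        if i < nt && PySem.List.pyGetD rv jc.1 false && (tl[i]? == some jc.2)
        then i + 1 else i) 0
    fi == nt

-- ===== PORT B =====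
-- hand-written binary search of Source B: while lo < hi: mid=(lo+hi)//2; …
-- (lst[mid] ported as getD: mid is always in range when called with hi = lst.length)
def bsearchGt (lst : List Int) (prev : Int) (lo hi : Nat) : Nat :=
  if _h : lo < hi then
    let mid := (lo + hi) / 2
    if prev < lst.getD mid 0 then bsearchGt lst prev lo mid
    else bsearchGt lst prev (mid + 1) hi
  else lo
termination_by hi - lo
decreasing_by all_goals omega

-- the 'for c in t' loop with its early 'return False' (lst[lo] as getD: lo < len on that branch)
def bMatch (pos : PySem.Dict Char (List Int)) : List Char → Int → Bool
  | [], _ => true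
  | c :: ts, prev =>
    let lst := pos.getD c []
    let lo := bsearchGt lst prev 0 lst.length
    if lo == lst.length then false
    else bMatch pos ts (lst.getD lo 0)

def calc_py_alt (s : String) (t : String) (remove : List Int) (k : Int) : Bool :=
  let banned : PySem.Set Int := PySem.Set.ofList (PySem.List.slice remove none (some (max k 0)))
  -- pos = {}; for j, c in enumerate(s): if j not in banned: pos.setdefault(c, []).append(j)
  let pos : PySem.Dict Char (List Int) :=
    (PySem.List.enumerate s.toList 0).foldl
      (fun d jc =>
        if !(PySem.Set.contains banned jc.1) then d.modify jc.2 [] (· ++ [jc.1]) else d)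
      PySem.Dict.empty
  bMatch pos t.toList (-1)

-- ===== PRECONDITION & SPEC =====
-- Pre_ excludes (a) inputs where A raises IndexError (k > len(remove), or some remove[i], i < k,
-- outside [-len(s), len(s))), and (b) negative in-range removal indices in remove[:k]: an
-- unspecified corner where A's list assignment wraps to remove s[len(s)+idx] while B's index set
-- never matches a negative index — both behaviours are defensible for out-of-spec indices.
def Pre_calc_py (s : String) (t : String) (remove : List Int) (k : Int) : Prop :=
  k ≤ (remove.length : Int) ∧ ∀ r ∈ remove.take k.toNat, 0 ≤ r ∧ r < (s.toList.length : Int)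
instance (s : String) (t : String) (remove : List Int) (k : Int) : Decidable (Pre_calc_py s t remove k) := by unfold Pre_calc_py; infer_instance

def pvWitness_calc_py : String × String × List Int × Int := ("abcab", "ba", [1, 2], 2)

def Spec_calc_py (s : String) (t : String) (remove : List Int) (k : Int) (out : Bool) : Prop := out = calc_py_alt s t remove k
instance (s : String) (t : String) (remove : List Int) (k : Int) (out : Bool) : Decidable (Spec_calc_py s t remove k out) := by unfold Spec_calc_py; infer_instance

-- ===== CLAIM (what is proved, stated in full; the proofs are below) =====
def Claim_equal_calc_py : Prop := ∀ (s : String) (t : String) (remove : List Int) (k : Int), Dom_calc_py s t remove k → Pre_calc_py s t remove k → Spec_calc_py s t remove k (calc_py s t remove k)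

-- ===== LEMMAS AND PROOFS =====

-- `c in it` on a list iterator: scan for c, return the remaining elements (none = not found)
def pyConsume (c : Char) : List Char → Option (List Char)
  | [] => none
  | x :: xs => if x == c then some xs else pyConsume c xs

-- greedy subsequence matching, recursively (intermediate form bridging the two ports)
def pyAllIn : List Char → List Char → Bool
  | [], _ => true
  | c :: ts, xs =>
    match pyConsume c xs with
    | none => false
    | some r => pyAllIn ts r

-- the option-threaded mask-building fold succeeds once every removed index is in range
lemma mask_fold_ok (vals : List Int) :
    ∀ (rv : List Bool), (∀ v ∈ vals, 0 ≤ v ∧ v < (rv.length : Int)) →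
    vals.foldl (fun acc v => acc.bind (fun rv => PySem.List.pySet? rv v false)) (some rv)
      = some (vals.foldl (fun rv v => rv.set v.toNat false) rv) := by
  induction vals with
  | nil => intro rv _; rfl
  | cons v vs ih =>
    intro rv h
    have hv := h v (by simp)
    have hlt : v.toNat < rv.length := by omega
    have hset : PySem.List.pySet? rv v false = some (rv.set v.toNat false) := by
      have hv' : v = ((v.toNat : Nat) : Int) := by omega
      rw [hv']; exact PySem.List.pySet?_natCast rv v.toNat false hlt
    simp only [List.foldl_cons, Option.bind_some, hset]
    exact ih _ (fun w hw => by
      have := h w (by simp [hw])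
      simpa using this)

lemma mask_get (vals : List Int) :
    ∀ (rv : List Bool) (j : Nat), (∀ v ∈ vals, 0 ≤ v) → j < rv.length →
    (vals.foldl (fun rv v => rv.set v.toNat false) rv).getD j false
      = (rv.getD j false && !decide ((j : Int) ∈ vals)) := by
  induction vals with
  | nil => intro rv j _ hj; simp
  | cons v vs ih =>
    intro rv j h hj
    have h0 := h v (by simp)
    simp only [List.foldl_cons]
    rw [ih _ j (fun w hw => h w (by simp [hw])) (by simpa using hj)]
    have hgd : (rv.set v.toNat false).getD j false = if v.toNat = j then false else rv.getD j false := by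
      by_cases hvj : v.toNat = j
      · subst hvj
        simp [List.getD, List.getElem?_set_self', List.getElem?_eq_getElem hj, Function.const]
      · simp [List.getD, List.getElem?_set_ne (by omega : v.toNat ≠ j), hvj]
    rw [hgd]
    by_cases hvj : v.toNat = j
    · have : (j : Int) = v := by omega
      simp [this.symm, List.mem_cons]
    · have : ¬ ((j : Int) = v) := by omega
      simp [List.mem_cons, this, hvj]

-- the option-threaded pyRange fold equals the fold over the fetched prefix remove.take n
lemma fetch_fold (remove : List Int) :
    ∀ (n : Nat), n ≤ remove.length → ∀ (acc : Option (List Bool)),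
    (PySem.List.pyRange 0 (n : Int) 1).foldl
        (fun acc i => acc.bind (fun rv =>
          (PySem.List.pyGet? remove i).bind (fun idx => PySem.List.pySet? rv idx false))) acc
      = (remove.take n).foldl
          (fun acc idx => acc.bind (fun rv => PySem.List.pySet? rv idx false)) acc := by
  intro n
  induction n with
  | zero => intro _ acc; simp
  | succ m ih =>
    intro hm acc
    have h1 : ((m : Int) + 1) = ((m + 1 : Nat) : Int) := by push_cast; ring
    rw [← h1, PySem.List.pyRange_one_succ_right (by positivity), List.foldl_append,
        ih (by omega)]
    have htake : remove.take (m + 1) = remove.take m ++ [remove[m]'(by omega)] := by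
      rw [List.take_add_one]
      simp [List.getElem?_eq_getElem (by omega : m < remove.length)]
    rw [htake, List.foldl_append]
    simp [PySem.List.pyGet?_natCast, List.getElem?_eq_getElem (by omega : m < remove.length)]

-- greedy pointer matching over xs equals the recursive consuming scan over ts
lemma fold_eq_allIn (ts : List Char) :
    ∀ (xs : List Char) (i : Nat), i ≤ ts.length →
    ((xs.foldl (fun i c => if i < ts.length && (ts[i]? == some c) then i + 1 else i) i)
        == ts.length) = pyAllIn (ts.drop i) xs := by
  intro xs
  induction xs with
  | nil =>
    intro i hi
    simp only [List.foldl_nil]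
    by_cases h : i = ts.length
    · subst h; simp [List.drop_length, pyAllIn]
    · have hlt : i < ts.length := by omega
      rw [List.drop_eq_getElem_cons hlt]
      simp [pyAllIn, pyConsume, h]
  | cons x xs ih =>
    intro i hi
    simp only [List.foldl_cons]
    by_cases h : i < ts.length
    · rw [List.drop_eq_getElem_cons h]
      by_cases hx : ts[i] = x
      · have hif : (if (decide (i < ts.length) && (ts[i]? == some x)) = true then i + 1 else i) = i + 1 := by
          simp [h, hx]
        rw [hif, ih (i + 1) (by omega)]
        simp [pyAllIn, pyConsume, hx]
      · have hbeq : (ts[i]? == some x) = false := by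
          simp [List.getElem?_eq_getElem h, hx]
        have hif : (if (decide (i < ts.length) && (ts[i]? == some x)) = true then i + 1 else i) = i := by
          simp [hbeq]
        rw [hif, ih i hi, List.drop_eq_getElem_cons h]
        have hne : (x == ts[i]) = false := by
          rw [beq_eq_false_iff_ne]
          exact fun hxx => hx hxx.symm
        simp [pyAllIn, pyConsume, hne]
    · have hif : (if (decide (i < ts.length) && (ts[i]? == some x)) = true then i + 1 else i) = i := by
        simp [h]
      have hii : i = ts.length := by omega
      rw [hif, ih i hi, hii, List.drop_length]
      simp [pyAllIn]

-- ---- B-side lemmas: binary search and the indexed match ----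

-- bsearchGt on a strictly increasing list finds the boundary:
-- everything before the result is ≤ prev, everything from it on is > prev
lemma bsearchGt_spec (lst : List Int) (prev : Int)
    (hsort : ∀ i j, (hi : i < lst.length) → (hj : j < lst.length) → i < j → lst[i] < lst[j]) :
    ∀ (fuel lo hi : Nat), hi - lo ≤ fuel → lo ≤ hi → hi ≤ lst.length →
    (∀ i, i < lo → (h : i < lst.length) → lst[i] ≤ prev) →
    (∀ i, hi ≤ i → (h : i < lst.length) → prev < lst[i]) →
    bsearchGt lst prev lo hi ≤ lst.length ∧
    (∀ i, i < bsearchGt lst prev lo hi → (h : i < lst.length) → lst[i] ≤ prev) ∧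
    (∀ i, bsearchGt lst prev lo hi ≤ i → (h : i < lst.length) → prev < lst[i]) := by
  intro fuel
  induction fuel with
  | zero =>
    intro lo hi hf hlh hhl hlow hhigh
    have heq : lo = hi := by omega
    subst heq
    rw [bsearchGt]
    simp only [lt_irrefl, dite_false]
    exact ⟨hhl, hlow, hhigh⟩
  | succ f ih =>
    intro lo hi hf hlh hhl hlow hhigh
    rw [bsearchGt]
    by_cases h : lo < hi
    · simp only [h, dite_true]
      have hmidlt : (lo + hi) / 2 < lst.length := by omega
      have hget : lst.getD ((lo + hi) / 2) 0 = lst[(lo + hi) / 2] := by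
        simp [List.getD, List.getElem?_eq_getElem hmidlt]
      by_cases hc : prev < lst.getD ((lo + hi) / 2) 0
      · simp only [hc, if_true]
        refine ih lo ((lo + hi) / 2) (by omega) (by omega) (by omega) hlow ?_
        intro i hi' h'
        rcases Nat.eq_or_lt_of_le hi' with he | hlt
        · rw [hget] at hc; exact he ▸ hc
        · calc prev < lst[(lo + hi) / 2] := by rw [hget] at hc; exact hc
            _ < lst[i] := hsort _ _ hmidlt h' hlt
      · simp only [hc, if_false]
        refine ih ((lo + hi) / 2 + 1) hi (by omega) (by omega) hhl ?_ hhigh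
        intro i hi' h'
        have hle : lst[(lo + hi) / 2] ≤ prev := by rw [hget] at hc; omega
        rcases Nat.lt_or_ge i ((lo + hi) / 2) with hlt | hge
        · exact le_of_lt (lt_of_lt_of_le (hsort _ _ h' hmidlt hlt) hle)
        · have : i = (lo + hi) / 2 := by omega
          exact this ▸ hle
    · simp only [h, dite_false]
      have heq : lo = hi := by omega
      exact ⟨by omega, hlow, fun i hi' h' => hhigh i (by omega) h'⟩

-- a list splits at the boundary index: filter = drop there
lemma filter_eq_drop {α : Type} (p : α → Bool) :
    ∀ (lst : List α) (r : Nat), r ≤ lst.length →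
    (∀ i, i < r → (h : i < lst.length) → p lst[i] = false) →
    (∀ i, r ≤ i → (h : i < lst.length) → p lst[i] = true) →
    lst.filter p = lst.drop r := by
  intro lst
  induction lst with
  | nil => intro r hr _ _; simp at hr ⊢
  | cons x xs ih =>
    intro r hr hlow hhigh
    cases r with
    | zero =>
      rw [List.drop_zero, List.filter_eq_self]
      intro a ha
      rcases List.mem_iff_getElem.1 ha with ⟨i, hi, rfl⟩
      exact hhigh i (by omega) hi
    | succ r' =>
      have hx : p x = false := hlow 0 (by omega) (by simp)
      simp only [List.drop_succ_cons, List.filter_cons, hx, if_neg Bool.false_ne_true]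
      exact ih r' (by simpa using hr)
        (fun i hi h => hlow (i + 1) (by omega) (by simpa using h))
        (fun i hi h => hhigh (i + 1) (by omega) (by simpa using h))

-- consuming a character that is not present fails
lemma pyConsume_eq_none (c : Char) : ∀ (xs : List Char), c ∉ xs → pyConsume c xs = none := by
  intro xs
  induction xs with
  | nil => intro _; rfl
  | cons x xs ihx =>
    intro hnm
    simp only [List.mem_cons, not_or] at hnm
    have hx : (x == c) = false := by simp [Ne.symm hnm.1]
    simp only [pyConsume, hx, if_neg Bool.false_ne_true]
    exact ihx hnm.2

-- consuming c from the chars of an index-increasing pair list whose first c-pair has index j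
lemma pyConsume_pairs (c : Char) :
    ∀ (K : List (Int × Char)), K.Pairwise (fun p q => p.1 < q.1) → ∀ (j : Int),
    ((K.filter (fun p => p.2 == c)).map (·.1)).head? = some j →
    pyConsume c (K.map (·.2)) = some ((K.filter (fun p => decide (j < p.1))).map (·.2)) := by
  intro K
  induction K with
  | nil => intro _ j hj; simp at hj
  | cons p K' ih =>
    intro hpw j hj
    have hpl : ∀ q ∈ K', p.1 < q.1 := (List.pairwise_cons.1 hpw).1
    have hpw' : K'.Pairwise (fun p q => p.1 < q.1) := (List.pairwise_cons.1 hpw).2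
    by_cases hp : p.2 == c
    · have hjp : j = p.1 := by
        simp only [List.filter_cons, hp, if_true, List.map_cons, List.head?_cons,
          Option.some.injEq] at hj
        exact hj.symm
      subst hjp
      have hKfil : K'.filter (fun q => decide (p.1 < q.1)) = K' :=
        List.filter_eq_self.2 (fun q hq => by simpa using hpl q hq)
      simp [pyConsume, hp, hKfil]
    · have hjK' : ((K'.filter (fun q => q.2 == c)).map (·.1)).head? = some j := by
        rw [List.filter_cons_of_neg (by simpa using hp)] at hj
        exact hj
      have hjmem : j ∈ (K'.filter (fun q => q.2 == c)).map (·.1) :=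
        List.mem_of_mem_head? hjK'
      have hpj : p.1 < j := by
        rcases List.mem_map.1 hjmem with ⟨q, hq, rfl⟩
        exact hpl q (List.mem_of_mem_filter hq)
      have hfail : (decide (j < p.1)) = false := by simp; omega
      simp only [List.map_cons, pyConsume, hp, List.filter_cons, hfail,
        if_neg Bool.false_ne_true]
      exact ih hpw' j hjK'

-- the bridge: greedy consuming over the surviving pairs past prev = the indexed binary-search loop
lemma allIn_eq_bMatch (kept : List (Int × Char)) (hpw : kept.Pairwise (fun p q => p.1 < q.1))
    (pos : PySem.Dict Char (List Int))
    (hL : ∀ c, pos.getD c [] = (kept.filter (fun p => p.2 == c)).map (·.1)) :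
    ∀ (ts : List Char) (prev : Int),
    pyAllIn ts ((kept.filter (fun p => decide (prev < p.1))).map (·.2)) = bMatch pos ts prev := by
  intro ts
  induction ts with
  | nil => intro prev; simp [pyAllIn, bMatch]
  | cons c ts ih =>
    intro prev
    rw [bMatch]
    set lst := pos.getD c [] with hlst
    have hlstval : lst = (kept.filter (fun p => p.2 == c)).map (·.1) := hL c
    -- lst is strictly increasing
    have hsort : ∀ i j, (hi : i < lst.length) → (hj : j < lst.length) → i < j → lst[i] < lst[j] := by
      have : lst.Pairwise (· < ·) := by
        rw [hlstval]
        exact (List.Pairwise.filter _ hpw).map _ (fun a b h => h)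
      intro i j hi hj hij
      exact List.pairwise_iff_getElem.1 this i j hi hj hij
    set r := bsearchGt lst prev 0 lst.length with hr
    obtain ⟨hrle, hrlow, hrhigh⟩ :=
      bsearchGt_spec lst prev hsort (lst.length) 0 lst.length (by omega) (by omega) (le_refl _)
        (by omega) (by omega)
    -- filter (prev < ·) on lst is drop r
    have hdrop : lst.filter (fun x => decide (prev < x)) = lst.drop r :=
      filter_eq_drop _ lst r hrle
        (fun i hi h => by simpa using not_lt.2 (hrlow i hi h))
        (fun i hi h => by simpa using hrhigh i hi h)
    -- that filter is also the first-components of the c-pairs past prev, in either nesting order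
    have hcomm : lst.filter (fun x => decide (prev < x))
        = ((kept.filter (fun p => decide (prev < p.1))).filter (fun p => p.2 == c)).map (·.1) := by
      rw [hlstval, List.filter_map]
      congr 1
      rw [List.filter_filter, List.filter_filter]
      exact List.filter_congr (fun p _ => by simp [Bool.and_comm])
    by_cases hend : r = lst.length
    · -- nothing to match: c does not occur past prev
      simp only [hend, beq_self_eq_true, if_true]
      have hnil : lst.filter (fun x => decide (prev < x)) = [] := by
        rw [hdrop, hend, List.drop_length]
      have hnotmem : c ∉ (kept.filter (fun p => decide (prev < p.1))).map (·.2) := by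
        intro hc
        rcases List.mem_map.1 hc with ⟨p, hp, rfl⟩
        rcases List.mem_filter.1 hp with ⟨hpk, hppr⟩
        have : p.1 ∈ lst.filter (fun x => decide (prev < x)) := by
          rw [hcomm]
          exact List.mem_map_of_mem (List.mem_filter.2 ⟨List.mem_filter.2 ⟨hpk, hppr⟩, by simp⟩)
        rw [hnil] at this
        simp at this
      rw [pyAllIn, pyConsume_eq_none c _ hnotmem]
    · -- a match exists: it is lst[r], and consuming it leaves the pairs past lst[r]
      have hrlt : r < lst.length := by omega
      have hgetD : lst.getD r 0 = lst[r] := by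
        simp [List.getD, List.getElem?_eq_getElem hrlt]
      have hbeq : (r == lst.length) = false := by simp [hend]
      simp only [hbeq, if_neg Bool.false_ne_true, hgetD]
      set j := lst[r] with hj
      set K := kept.filter (fun p => decide (prev < p.1)) with hK
      have hKpw : K.Pairwise (fun p q => p.1 < q.1) := List.Pairwise.filter _ hpw
      have hhead : ((K.filter (fun p => p.2 == c)).map (·.1)).head? = some j := by
        rw [← hcomm, hdrop, hj]
        rw [List.head?_drop]
        simp [List.getElem?_eq_getElem hrlt]
      have hcons := pyConsume_pairs c K hKpw j hhead
      rw [pyAllIn, hcons]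
      have hKj : K.filter (fun p => decide (j < p.1)) = kept.filter (fun p => decide (j < p.1)) := by
        rw [hK, List.filter_filter]
        refine List.filter_congr (fun p _ => ?_)
        have hprevj : prev < j := hrhigh r (le_refl r) hrlt
        by_cases hpj : j < p.1
        · simp [hpj]; omega
        · simp [hpj]
      rw [hKj]
      exact ih lst[r]

-- ===== VERDICT (by name: the statement is the Claim_ definition above) =====
theorem calc_py_spec : Claim_equal_calc_py := by
  intro s t remove k _hdom hpre
  obtain ⟨hk, hvals⟩ := hpre
  unfold Spec_calc_py
  simp only [calc_py, calc_py_alt]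
  set sl := s.toList with hsl
  set tl := t.toList with htl
  set ns := sl.length with hns
  set nt := tl.length with hnt
  -- normalize the range bound and the slice to remove.take k.toNat
  have hkt : k ≤ 0 ∨ k = ((k.toNat : Nat) : Int) := by omega
  have hrange : PySem.List.pyRange 0 k 1 = PySem.List.pyRange 0 ((k.toNat : Nat) : Int) 1 := by
    rcases hkt with h | h
    · rw [PySem.List.pyRange_one_eq_nil h, PySem.List.pyRange_one_eq_nil (by omega)]
    · rw [← h]
  have hslice : PySem.List.slice remove none (some (max k 0)) = remove.take k.toNat := by
    have h := PySem.List.slice_to remove (b := max k 0) (by omega)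
    rw [h]
    congr 1
    omega
  set vals := remove.take k.toNat with hvalsdef
  -- the mask fold succeeds and its entries are membership in vals
  have hvlen : ∀ v ∈ vals, 0 ≤ v ∧ v < ((List.replicate ns true).length : Int) := by
    intro v hv
    have := hvals v hv
    simpa using this
  have hmask :
      (PySem.List.pyRange 0 k 1).foldl
        (fun acc i => acc.bind (fun rv =>
          (PySem.List.pyGet? remove i).bind (fun idx => PySem.List.pySet? rv idx false)))
        (some (List.replicate ns true))
      = some (vals.foldl (fun rv v => rv.set v.toNat false) (List.replicate ns true)) := by
    rw [hrange, fetch_fold remove k.toNat (by omega), ← hvalsdef]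
    exact mask_fold_ok vals _ hvlen
  simp only [hmask]
  set rv := vals.foldl (fun rv v => rv.set v.toNat false) (List.replicate ns true) with hrv
  have hrvget : ∀ j : Nat, j < ns →
      rv.getD j false = !decide ((j : Int) ∈ vals) := by
    intro j hj
    rw [hrv, mask_get vals _ j (fun v hv => (hvals v hv).1) (by simpa using hj)]
    simp [List.getD, hj]
  -- B's banned set tests membership in vals
  have hcont : ∀ j : Int, PySem.Set.contains (PySem.Set.ofList (PySem.List.slice remove none (some (max k 0)))) j = decide (j ∈ vals) := by
    intro j
    rw [hslice]
    by_cases hj : j ∈ vals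
    · rw [(PySem.Set.contains_iff _ _).2 ((PySem.Set.mem_ofList _ _).2 hj)]
      simp [hj]
    · have : ¬ j ∈ PySem.Set.ofList vals := fun h => hj ((PySem.Set.mem_ofList _ _).1 h)
      simp only [hj, decide_false]
      by_contra hcc
      exact this ((PySem.Set.contains_iff _ _).1 (by simpa using hcc))
  -- rewrite A's fused loop step into "skip-if-removed, then match"
  have hstep : (PySem.List.enumerate sl 0).foldl
      (fun (i : Nat) jc =>
        if i < nt && PySem.List.pyGetD rv jc.1 false && (tl[i]? == some jc.2)
        then i + 1 else i) 0
    = (PySem.List.enumerate sl 0).foldl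
      (fun (i : Nat) jc =>
        if !(PySem.Set.contains (PySem.Set.ofList (PySem.List.slice remove none (some (max k 0)))) jc.1)
        then (if i < nt && (tl[i]? == some jc.2) then i + 1 else i) else i) 0 := by
    apply PySem.List.foldl_congr_mem
    intro i jc hjc
    obtain ⟨m, hm, hjceq⟩ := (PySem.List.mem_enumerate_iff _ _ _).1 hjc
    have hfst : jc.1 = (m : Int) := by rw [hjceq]; simp
    have hmask' : PySem.List.pyGetD rv jc.1 false = !decide ((m : Int) ∈ vals) := by
      rw [hfst, PySem.List.pyGetD_natCast]
      have := hrvget m hm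
      simpa [List.getD] using this
    rw [hmask', hcont, hfst]
    by_cases hmem : (m : Int) ∈ vals <;> simp [hmem]
  -- name the surviving pairs and rewrite both sides over them
  set banned := PySem.Set.ofList (PySem.List.slice remove none (some (max k 0))) with hbanned
  set kept := (PySem.List.enumerate sl 0).filter (fun jc => !(PySem.Set.contains banned jc.1))
    with hkept
  -- A's side: greedy pointer over kept's characters = pyAllIn
  rw [hstep, PySem.List.foldl_if_eq_foldl_filter, ← hkept,
    (List.foldl_map (f := fun (jc : Int × Char) => jc.2)
      (g := fun (i : Nat) c => if i < nt && (tl[i]? == some c) then i + 1 else i)).symm]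
  have hA := fold_eq_allIn tl (kept.map (·.2)) 0 (by omega)
  rw [List.drop_zero] at hA
  rw [hA]
  -- B's side: the dict fold over the fused loop = grouped index lists over kept
  have hBdict : (PySem.List.enumerate sl 0).foldl
      (fun d jc => if !(PySem.Set.contains banned jc.1) then d.modify jc.2 [] (· ++ [jc.1]) else d)
      PySem.Dict.empty
    = (kept.map (fun jc => (jc.2, jc.1))).foldl
        (fun d p => d.modify p.1 [] (· ++ [p.2])) PySem.Dict.empty := by
    rw [PySem.List.foldl_if_eq_foldl_filter, ← hkept, List.foldl_map]
  rw [hBdict]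
  -- its lookups are the per-character index lists
  have hL : ∀ c, ((kept.map (fun jc => (jc.2, jc.1))).foldl
        (fun d p => d.modify p.1 [] (· ++ [p.2])) PySem.Dict.empty).getD c []
      = (kept.filter (fun p => p.2 == c)).map (·.1) := by
    intro c
    rw [PySem.Dict.getD_foldl_modify_append, PySem.Dict.getD_empty, List.nil_append,
      List.filter_map]
    simp [Function.comp_def]
  -- kept's indices are strictly increasing and all ≥ 0, so filtering past -1 keeps everything
  have hpw : kept.Pairwise (fun p q => p.1 < q.1) :=
    List.Pairwise.filter _ (PySem.List.pairwise_lt_enumerate sl 0)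
  have hall : kept.filter (fun p => decide ((-1 : Int) < p.1)) = kept := by
    refine List.filter_eq_self.2 (fun p hp => ?_)
    have hpk : p ∈ PySem.List.enumerate sl 0 := List.mem_of_mem_filter hp
    obtain ⟨m, hm, rfl⟩ := (PySem.List.mem_enumerate_iff _ _ _).1 hpk
    simp
    omega
  have hfin := allIn_eq_bMatch kept hpw _ hL tl (-1)
  rw [hall] at hfin
  exact hfin
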